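-- pv_equiv track=rewrite | github.com/zacharykcc/Westshore-Computer-Science-Club-22-23 | SortaRot/solu.py | apply_rotations
-- ===== SOURCE A (Python) =====
-- def rot_back_3(char):
--     if 'a' <= char <= 'z':
--         return chr((ord(char) - ord('a') - 3) % 26 + ord('a'))
--     elif 'A' <= char <= 'Z':
--         return chr((ord(char) - ord('A') - 3) % 26 + ord('A'))
--     else:
--         return char
--
-- def rot_back_13(char):
--     if 'a' <= char <= 'z':
--         return chr((ord(char) - ord('a') - 13) % 26 + ord('a'))
--     elif 'A' <= char <= 'Z':
--         return chr((ord(char) - ord('A') - 13) % 26 + ord('A'))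
--     else:
--         return char
--
-- def apply_rotations(input_string):
--     result = ""
--     char_count = 0  # Counter to keep track of non-whitespace characters
--     for i in range(len(input_string)):
--         if input_string[i].isspace():  # Check if the character is whitespace
--             result += " "  # Preserve whitespace characters
--         else:
--             char_count += 1  # Increment the character count for non-whitespace characters
--             if char_count % 2 == 0:  # Check if the current non-whitespace character is at an even position
--                 result += rot_back_13(input_string[i])  # Rotate even-indexed characters backward by 13 positions
--             else:
--                 result += rot_back_3(input_string[i])   # Rotate odd-indexed characters backward by 3 positions
--     return result
-- ===== SOURCE B (Python) =====
-- def shift_back(c, k):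
--     if 'a' <= c <= 'z':
--         return chr((ord(c) - ord('a') - k) % 26 + ord('a'))
--     if 'A' <= c <= 'Z':
--         return chr((ord(c) - ord('A') - k) % 26 + ord('A'))
--     return c
--
-- def apply_rotations(input_string):
--     nonws = [c for c in input_string if not c.isspace()]
--     transformed = [shift_back(c, 3 if i % 2 == 0 else 13) for i, c in enumerate(nonws)]
--     it = iter(transformed)
--     return "".join(" " if c.isspace() else next(it) for c in input_string)
-- ===== Notes on version B (the rewrite author's own statement) =====
-- stated objective: alternative
-- what changed: B replaces A's single interleaved counter loop by two differently-shaped passes: filter out the non-whitespace characters, transform them by their 0-based rank with one parametric backward shift, then reassemble by walking the original string and drawing from the transformed queue (whitespace emitted as a single space).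
import Mathlib
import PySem

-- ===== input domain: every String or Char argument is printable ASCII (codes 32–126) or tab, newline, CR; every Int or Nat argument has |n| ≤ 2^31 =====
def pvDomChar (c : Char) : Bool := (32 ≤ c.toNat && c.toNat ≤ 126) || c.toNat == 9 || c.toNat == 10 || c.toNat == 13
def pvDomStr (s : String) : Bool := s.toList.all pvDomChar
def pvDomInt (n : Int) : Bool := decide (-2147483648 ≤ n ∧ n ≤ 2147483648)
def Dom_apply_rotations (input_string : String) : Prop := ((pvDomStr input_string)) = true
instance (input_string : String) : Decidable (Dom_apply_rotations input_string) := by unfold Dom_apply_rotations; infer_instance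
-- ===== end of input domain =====

-- B replaces A's interleaved counter loop by two passes (filter+rank-indexed map, then reassembly); alternative decomposition, same cost.

-- ===== PORT A =====
def rot_back_3 (c : Char) : Char :=
  if 'a' ≤ c ∧ c ≤ 'z' then
    Char.ofNat ((PySem.Int.mod ((c.toNat : Int) - ('a'.toNat : Int) - 3) 26).toNat + 'a'.toNat)
  else if 'A' ≤ c ∧ c ≤ 'Z' then
    Char.ofNat ((PySem.Int.mod ((c.toNat : Int) - ('A'.toNat : Int) - 3) 26).toNat + 'A'.toNat)
  else c

def rot_back_13 (c : Char) : Char :=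
  if 'a' ≤ c ∧ c ≤ 'z' then
    Char.ofNat ((PySem.Int.mod ((c.toNat : Int) - ('a'.toNat : Int) - 13) 26).toNat + 'a'.toNat)
  else if 'A' ≤ c ∧ c ≤ 'Z' then
    Char.ofNat ((PySem.Int.mod ((c.toNat : Int) - ('A'.toNat : Int) - 13) 26).toNat + 'A'.toNat)
  else c

-- A's for-loop over the characters, carrying the non-whitespace counter
def pvLoopA : List Char → Nat → List Char
  | [], _ => []
  | c :: rest, cnt =>
    if PySem.Chars.isspace c then ' ' :: pvLoopA rest cnt
    else if (cnt + 1) % 2 == 0 then rot_back_13 c :: pvLoopA rest (cnt + 1)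
    else rot_back_3 c :: pvLoopA rest (cnt + 1)

def apply_rotations (input_string : String) : String :=
  String.ofList (pvLoopA input_string.toList 0)

-- ===== PORT B =====
def shift_back (c : Char) (k : Int) : Char :=
  if 'a' ≤ c ∧ c ≤ 'z' then
    Char.ofNat ((PySem.Int.mod ((c.toNat : Int) - ('a'.toNat : Int) - k) 26).toNat + 'a'.toNat)
  else if 'A' ≤ c ∧ c ≤ 'Z' then
    Char.ofNat ((PySem.Int.mod ((c.toNat : Int) - ('A'.toNat : Int) - k) 26).toNat + 'A'.toNat)
  else c

-- reassemble: walk the original string, draw from the transformed queue at non-whitespace positions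
def pvRebuild : List Char → List Char → List Char
  | [], _ => []
  | c :: rest, q =>
    if PySem.Chars.isspace c then ' ' :: pvRebuild rest q
    else match q with
      | t :: q' => t :: pvRebuild rest q'
      | [] => pvRebuild rest []   -- unreachable: the queue has exactly one entry per non-whitespace char

def apply_rotations_alt (input_string : String) : String :=
  let nonws := input_string.toList.filter (fun c => !PySem.Chars.isspace c)
  let transformed := (PySem.List.enumerate nonws).map
      (fun p => shift_back p.2 (if PySem.Int.mod p.1 2 == 0 then 3 else 13))
  String.ofList (pvRebuild input_string.toList transformed)

-- ===== PRECONDITION & SPEC =====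
def Spec_apply_rotations (input_string : String) (out : String) : Prop := out = apply_rotations_alt input_string
instance (input_string : String) (out : String) : Decidable (Spec_apply_rotations input_string out) := by unfold Spec_apply_rotations; infer_instance

-- ===== CLAIM (what is proved, stated in full; the proofs are below) =====
def Claim_equal_apply_rotations : Prop := ∀ (input_string : String), Dom_apply_rotations input_string → Spec_apply_rotations input_string (apply_rotations input_string)

-- ===== LEMMAS AND PROOFS =====

-- the shift chosen for the rank-(cnt) element, as A computes it
def pvG (cnt : Nat) : List Char → List Char
  | [] => []
  | c :: t => (if (cnt + 1) % 2 == 0 then rot_back_13 c else rot_back_3 c) :: pvG (cnt + 1) t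

theorem pvG_eq_map (l : List Char) (n : Nat) :
    pvG n l = (PySem.List.enumerate l (n : Int)).map
      (fun p => shift_back p.2 (if PySem.Int.mod p.1 2 == 0 then 3 else 13)) := by
  induction l generalizing n with
  | nil => simp [pvG, PySem.List.enumerate_nil]
  | cons c t ih =>
    simp only [pvG, PySem.List.enumerate_cons, List.map_cons]
    refine List.cons_eq_cons.mpr ⟨?_, ?_⟩
    · -- head: parity match
      by_cases h2 : n % 2 = 0
      · have hf : ((n : Int)).fmod 2 = 0 := by
          rw [Int.fmod_eq_emod]; simp; omega
        have h1 : (n + 1) % 2 = 1 := by omega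
        simp [PySem.Int.mod, hf, h1, rot_back_3, shift_back]
      · have hf : ¬ ((n : Int)).fmod 2 = 0 := by
          rw [Int.fmod_eq_emod]; simp; omega
        have h1 : (n + 1) % 2 = 0 := by omega
        simp [PySem.Int.mod, hf, h1, rot_back_13, shift_back]
    · have := ih (n + 1)
      simpa [Nat.cast_add] using this

theorem pvLoopA_eq_rebuild (l : List Char) (n : Nat) :
    pvLoopA l n = pvRebuild l (pvG n (l.filter (fun c => !PySem.Chars.isspace c))) := by
  induction l generalizing n with
  | nil => simp [pvLoopA, pvRebuild]
  | cons c t ih =>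
    by_cases hs : PySem.Chars.isspace c = true
    · simp [pvLoopA, pvRebuild, hs, ih n]
    · simp only [pvLoopA, pvRebuild, hs, List.filter_cons, Bool.not_eq_true] at *
      by_cases hp : (n + 1) % 2 = 0
      · simp [hp, pvG, ih (n + 1)]
      · simp [hp, pvG, ih (n + 1)]

-- ===== VERDICT (by name: the statement is the Claim_ definition above) =====
theorem apply_rotations_spec : Claim_equal_apply_rotations := by
  intro s _
  show apply_rotations s = apply_rotations_alt s
  unfold apply_rotations apply_rotations_alt
  rw [pvLoopA_eq_rebuild, pvG_eq_map]
  norm_num
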